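-- pv_equiv track=rewrite | github.com/aryansahni30/PR-Reviewer | backend/services/github.py | _truncate_around_hunks
-- ===== SOURCE A (Python) =====
-- _MAX_LINES_PER_FILE = 300
--
-- _CONTEXT_AROUND_HUNK = 75
--
-- def _truncate_around_hunks(content: str, hunk_lines: list[int]) -> str:
--     """Keep only ~_CONTEXT_AROUND_HUNK lines around each changed hunk."""
--     lines = content.split("\n")
--     if len(lines) <= _MAX_LINES_PER_FILE:
--         return content
--
--     keep: set[int] = set()
--     for hunk_start in hunk_lines:
--         low = max(0, hunk_start - _CONTEXT_AROUND_HUNK - 1)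
--         high = min(len(lines), hunk_start + _CONTEXT_AROUND_HUNK)
--         keep.update(range(low, high))
--
--     # Also always keep the first 30 lines (imports / module docstring)
--     keep.update(range(0, min(30, len(lines))))
--
--     sorted_indices = sorted(keep)
--     result_lines: list[str] = []
--     prev = -1
--     for idx in sorted_indices:
--         if prev != -1 and idx != prev + 1:
--             result_lines.append(f"\n... [{idx - prev - 1} lines truncated] ...\n")
--         result_lines.append(lines[idx])
--         prev = idx
--
--     return "\n".join(result_lines)
-- ===== SOURCE B (Python) =====
-- _MAX_LINES_PER_FILE = 300
--
-- _CONTEXT_AROUND_HUNK = 75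
--
--
-- def _truncate_around_hunks(content: str, hunk_lines: list[int]) -> str:
--     """Single pass over the lines: keep a line iff it is in the first 30 or
--     within _CONTEXT_AROUND_HUNK of a hunk start, emitting gap markers on the fly
--     (no index set, no sort)."""
--     lines = content.split("\n")
--     if len(lines) <= _MAX_LINES_PER_FILE:
--         return content
--
--     def kept(i: int) -> bool:
--         if i < 30:
--             return True
--         for h in hunk_lines:
--             if h - _CONTEXT_AROUND_HUNK - 1 <= i < h + _CONTEXT_AROUND_HUNK:
--                 return True
--         return False
--
--     out: list[str] = []
--     last = None
--     for i, line in enumerate(lines):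
--         if kept(i):
--             if last is not None and i - last > 1:
--                 out.append(f"\n... [{i - last - 1} lines truncated] ...\n")
--             out.append(line)
--             last = i
--     return "\n".join(out)
-- ===== Notes on version B (the rewrite author's own statement) =====
-- stated objective: alternative
-- what changed: B replaces A's build-a-set-of-kept-indices-then-sort pipeline with a single forward pass over enumerate(lines) that tests a keep-predicate per line and emits gap markers on the fly (no set, no sort).
import Mathlib
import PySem

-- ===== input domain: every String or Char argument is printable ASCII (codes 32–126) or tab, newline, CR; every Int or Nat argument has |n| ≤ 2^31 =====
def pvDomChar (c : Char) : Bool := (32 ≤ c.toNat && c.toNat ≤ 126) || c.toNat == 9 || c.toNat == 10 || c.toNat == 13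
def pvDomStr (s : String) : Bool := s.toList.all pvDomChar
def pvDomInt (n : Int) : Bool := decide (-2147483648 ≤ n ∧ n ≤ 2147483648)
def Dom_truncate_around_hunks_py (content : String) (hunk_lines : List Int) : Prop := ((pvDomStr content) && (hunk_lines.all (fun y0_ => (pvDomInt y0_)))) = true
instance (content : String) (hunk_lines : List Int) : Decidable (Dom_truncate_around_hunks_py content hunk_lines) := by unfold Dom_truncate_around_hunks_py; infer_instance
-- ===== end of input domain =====

-- B replaces A's keep-set + sort with one streaming pass testing a per-line keep predicate; same output, proved equal.

-- module constants (shared by both Pythons)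
def pvMAX_LINES_PER_FILE : Int := 300
def pvCONTEXT_AROUND_HUNK : Int := 75

-- ===== PORT A =====
-- loop body of A's final 'for idx in sorted_indices' loop (result_lines, prev)
def pvStepA (lines : List String) (st : List String × Int) (idx : Int) : List String × Int :=
  ((if st.2 ≠ -1 ∧ idx ≠ st.2 + 1 then
      st.1 ++ ["\n... [" ++ PySem.Int.toStr (idx - st.2 - 1) ++ " lines truncated] ...\n"]
    else st.1) ++ [PySem.List.pyGetD lines idx ""],   -- lines[idx]; idx is always in range, so the default "" is never used
   idx)

def truncate_around_hunks_py (content : String) (hunk_lines : List Int) : String :=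
  let lines := (PySem.Str.split? content "\n").getD []  -- sep is the literal "\n" ≠ "", so split? is always some
  if (lines.length : Int) ≤ pvMAX_LINES_PER_FILE then content
  else
    let keep : PySem.Set Int :=
      hunk_lines.foldl (fun s h =>
        PySem.Set.update s (PySem.List.pyRange (max 0 (h - pvCONTEXT_AROUND_HUNK - 1))
                                               (min (lines.length : Int) (h + pvCONTEXT_AROUND_HUNK)) 1))
        PySem.Set.empty
    let keep := PySem.Set.update keep (PySem.List.pyRange 0 (min 30 (lines.length : Int)) 1)
    let sorted_indices := PySem.List.sorted keep (fun x => x) false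
    let res := sorted_indices.foldl (pvStepA lines) ([], -1)
    PySem.Str.join "\n" res.1

-- ===== PORT B =====
def pvKept (hunk_lines : List Int) (i : Int) : Bool :=
  if i < 30 then true
  else hunk_lines.any (fun h => decide (h - pvCONTEXT_AROUND_HUNK - 1 ≤ i) && decide (i < h + pvCONTEXT_AROUND_HUNK))

-- loop body of B's 'for i, line in enumerate(lines)' loop (out, last)
def pvStepB (hunk_lines : List Int) (st : List String × Option Int) (p : Int × String) : List String × Option Int :=
  if pvKept hunk_lines p.1 then
    ((match st.2 with
      | some last =>
          if p.1 - last > 1 then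
            st.1 ++ ["\n... [" ++ PySem.Int.toStr (p.1 - last - 1) ++ " lines truncated] ...\n"]
          else st.1
      | none => st.1) ++ [p.2],
     some p.1)
  else st

def truncate_around_hunks_py_alt (content : String) (hunk_lines : List Int) : String :=
  let lines := (PySem.Str.split? content "\n").getD []  -- sep is the literal "\n" ≠ "", so split? is always some
  if (lines.length : Int) ≤ pvMAX_LINES_PER_FILE then content
  else
    let res := (PySem.List.enumerate lines 0).foldl (pvStepB hunk_lines) ([], none)
    PySem.Str.join "\n" res.1

-- ===== PRECONDITION & SPEC =====
def Spec_truncate_around_hunks_py (content : String) (hunk_lines : List Int) (out : String) : Prop := out = truncate_around_hunks_py_alt content hunk_lines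
instance (content : String) (hunk_lines : List Int) (out : String) : Decidable (Spec_truncate_around_hunks_py content hunk_lines out) := by unfold Spec_truncate_around_hunks_py; infer_instance

-- ===== CLAIM (what is proved, stated in full; the proofs are below) =====
def Claim_equal_truncate_around_hunks_py : Prop := ∀ (content : String) (hunk_lines : List Int), Dom_truncate_around_hunks_py content hunk_lines → Spec_truncate_around_hunks_py content hunk_lines (truncate_around_hunks_py content hunk_lines)

-- ===== LEMMAS AND PROOFS =====

-- A's Int prev with sentinel -1 corresponds to B's Option Int last
def pvDecode : Option Int → Int
  | none => -1
  | some p => p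

lemma pv_mem_foldl_update (f : Int → List Int) (l : List Int) (s : PySem.Set Int) (x : Int) :
    x ∈ l.foldl (fun s h => PySem.Set.update s (f h)) s ↔ x ∈ s ∨ ∃ h ∈ l, x ∈ f h := by
  induction l generalizing s with
  | nil => simp
  | cons a t ih => simp [ih, PySem.Set.mem_update]; tauto

lemma pv_nodup_foldl_update (f : Int → List Int) (l : List Int) (s : PySem.Set Int)
    (hs : s.Nodup) : (l.foldl (fun s h => PySem.Set.update s (f h)) s).Nodup := by
  induction l generalizing s with
  | nil => exact hs
  | cons a t ih => exact ih _ (PySem.Set.nodup_update _ _ hs)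

lemma pv_fold_equiv (lines : List String) (hunk : List Int) :
    ∀ (l : List Int) (acc : List String) (o : Option Int),
      (∀ j ∈ l, 0 ≤ j) →
      (∀ p, o = some p → 0 ≤ p ∧ ∀ j ∈ l, p < j) →
      l.Pairwise (· < ·) →
      (l.filter (pvKept hunk)).foldl (pvStepA lines) (acc, pvDecode o)
        = ((l.foldl (fun st j => pvStepB hunk st (j, PySem.List.pyGetD lines j "")) (acc, o)).1,
           pvDecode (l.foldl (fun st j => pvStepB hunk st (j, PySem.List.pyGetD lines j "")) (acc, o)).2) := by
  intro l
  induction l with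
  | nil => intro acc o _ _ _; simp
  | cons j t ih =>
    intro acc o h0 ho hp
    obtain ⟨hjt, hpt⟩ := List.pairwise_cons.mp hp
    have hj0 : (0:Int) ≤ j := h0 j (by simp)
    have IH : ∀ acc' : List String,
        (t.filter (pvKept hunk)).foldl (pvStepA lines) (acc', j)
          = ((t.foldl (fun st j => pvStepB hunk st (j, PySem.List.pyGetD lines j "")) (acc', some j)).1,
             pvDecode (t.foldl (fun st j => pvStepB hunk st (j, PySem.List.pyGetD lines j "")) (acc', some j)).2) := by
      intro acc'
      have := ih acc' (some j) (fun x hx => h0 x (by simp [hx]))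
        (fun p hpe => by cases hpe; exact ⟨hj0, hjt⟩) hpt
      simpa [pvDecode] using this
    by_cases hk : pvKept hunk j
    · rw [List.filter_cons_of_pos hk, List.foldl_cons, List.foldl_cons]
      cases o with
      | none =>
        have hsa : pvStepA lines (acc, pvDecode none) j = (acc ++ [PySem.List.pyGetD lines j ""], j) := by
          simp [pvStepA, pvDecode]
        have hst : pvStepB hunk (acc, none) (j, PySem.List.pyGetD lines j "")
            = (acc ++ [PySem.List.pyGetD lines j ""], some j) := by
          simp [pvStepB, hk]
        rw [hsa, hst]; exact IH _
      | some p =>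
        obtain ⟨hp0, hplt⟩ := ho p rfl
        have hpj : p < j := hplt j (by simp)
        by_cases hc : j - p > 1
        · have hsa : pvStepA lines (acc, pvDecode (some p)) j
              = (acc ++ ["\n... [" ++ PySem.Int.toStr (j - p - 1) ++ " lines truncated] ...\n"]
                  ++ [PySem.List.pyGetD lines j ""], j) := by
            have h1 : (p ≠ -1 ∧ j ≠ p + 1) := by omega
            simp [pvStepA, pvDecode, h1]
          have hst : pvStepB hunk (acc, some p) (j, PySem.List.pyGetD lines j "")
              = (acc ++ ["\n... [" ++ PySem.Int.toStr (j - p - 1) ++ " lines truncated] ...\n"]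
                  ++ [PySem.List.pyGetD lines j ""], some j) := by
            simp [pvStepB, hk, hc]
          rw [hsa, hst]; exact IH _
        · have hsa : pvStepA lines (acc, pvDecode (some p)) j = (acc ++ [PySem.List.pyGetD lines j ""], j) := by
            have h1 : ¬ (p ≠ -1 ∧ j ≠ p + 1) := by omega
            simp [pvStepA, pvDecode, h1]
          have hst : pvStepB hunk (acc, some p) (j, PySem.List.pyGetD lines j "")
              = (acc ++ [PySem.List.pyGetD lines j ""], some j) := by
            simp [pvStepB, hk, hc]
          rw [hsa, hst]; exact IH _
    · rw [List.filter_cons_of_neg hk, List.foldl_cons]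
      have hst : pvStepB hunk (acc, o) (j, PySem.List.pyGetD lines j "") = (acc, o) := by
        simp [pvStepB, hk]
      rw [hst]
      exact ih acc o (fun x hx => h0 x (by simp [hx]))
        (fun p hpe => ⟨(ho p hpe).1, fun x hx => (ho p hpe).2 x (by simp [hx])⟩) hpt

lemma pv_kept_iff (hunk : List Int) (x : Int) :
    pvKept hunk x = true ↔ x < 30 ∨ ∃ h ∈ hunk, h - 76 ≤ x ∧ x < h + 75 := by
  unfold pvKept pvCONTEXT_AROUND_HUNK
  by_cases hx : x < 30
  · simp [hx]
  · simp only [if_neg hx, List.any_eq_true, Bool.and_eq_true, decide_eq_true_eq]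
    constructor
    · rintro ⟨h, hm, h1, h2⟩; exact Or.inr ⟨h, hm, by omega, by omega⟩
    · rintro (h | ⟨h, hm, h1, h2⟩)
      · omega
      · exact ⟨h, hm, by omega, by omega⟩

-- sorted(keep) is exactly the kept indices of range(n), in order
lemma pv_sorted_keep (hunk : List Int) (N : Int) (hN : 0 < N) :
    PySem.List.sorted
      (PySem.Set.update
        (hunk.foldl (fun s h =>
          PySem.Set.update s (PySem.List.pyRange (max 0 (h - pvCONTEXT_AROUND_HUNK - 1)) (min N (h + pvCONTEXT_AROUND_HUNK)) 1))
          PySem.Set.empty)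
        (PySem.List.pyRange 0 (min 30 N) 1)) (fun x => x) false
      = (PySem.List.pyRange 0 N 1).filter (pvKept hunk) := by
  set K : PySem.Set Int := PySem.Set.update
      (hunk.foldl (fun s h =>
        PySem.Set.update s (PySem.List.pyRange (max 0 (h - pvCONTEXT_AROUND_HUNK - 1)) (min N (h + pvCONTEXT_AROUND_HUNK)) 1))
        PySem.Set.empty)
      (PySem.List.pyRange 0 (min 30 N) 1) with hK
  have hmemK : ∀ x, x ∈ K ↔ ((∃ h ∈ hunk, max 0 (h - 76) ≤ x ∧ x < min N (h + 75)) ∨ (0 ≤ x ∧ x < min 30 N)) := by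
    intro x
    rw [hK]
    unfold pvCONTEXT_AROUND_HUNK
    rw [PySem.Set.mem_update, pv_mem_foldl_update]
    simp [PySem.List.mem_pyRange_one, PySem.Set.empty]
    constructor
    · rintro (⟨h, hm, h1, h2⟩ | h) <;> [exact Or.inl ⟨h, hm, by omega, by omega⟩; exact Or.inr h]
    · rintro (⟨h, hm, h1, h2⟩ | h) <;> [exact Or.inl ⟨h, hm, by omega, by omega⟩; exact Or.inr h]
  have hndK : K.Nodup := by
    rw [hK]
    exact PySem.Set.nodup_update _ _ (pv_nodup_foldl_update _ _ _ List.nodup_nil)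
  have hpairF : ((PySem.List.pyRange 0 N 1).filter (pvKept hunk)).Pairwise (· < ·) :=
    (PySem.List.pairwise_lt_pyRange_one 0 N).sublist List.filter_sublist
  have hndF : ((PySem.List.pyRange 0 N 1).filter (pvKept hunk)).Nodup :=
    hpairF.imp (fun h => ne_of_lt h)
  have hperm : ((PySem.List.pyRange 0 N 1).filter (pvKept hunk)).Perm K := by
    rw [List.perm_ext_iff_of_nodup hndF hndK]
    intro x
    rw [List.mem_filter, PySem.List.mem_pyRange_one, hmemK x, pv_kept_iff]
    constructor
    · rintro ⟨⟨hx0, hxN⟩, h30 | ⟨h, hm, h1, h2⟩⟩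
      · exact Or.inr ⟨hx0, by omega⟩
      · exact Or.inl ⟨h, hm, by omega, by omega⟩
    · rintro (⟨h, hm, h1, h2⟩ | ⟨h1, h2⟩)
      · exact ⟨⟨by omega, by omega⟩, Or.inr ⟨h, hm, by omega, by omega⟩⟩
      · exact ⟨⟨by omega, by omega⟩, Or.inl (by omega)⟩
  exact PySem.List.sorted_eq_of_perm_of_pairwise_lt _ _ _ hperm hpairF

-- ===== VERDICT (by name: the statement is the Claim_ definition above) =====
theorem truncate_around_hunks_py_spec : Claim_equal_truncate_around_hunks_py := by
  intro content hunk_lines _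
  unfold Spec_truncate_around_hunks_py truncate_around_hunks_py truncate_around_hunks_py_alt
  set lines := (PySem.Str.split? content "\n").getD []  -- sep is the literal "\n" ≠ "", so split? is always some with hlines
  by_cases hlen : (lines.length : Int) ≤ pvMAX_LINES_PER_FILE
  · simp [hlen]
  · simp only [if_neg hlen]
    have hN : 0 < (lines.length : Int) := by unfold pvMAX_LINES_PER_FILE at hlen; omega
    rw [pv_sorted_keep hunk_lines (lines.length : Int) hN]
    rw [PySem.List.enumerate_eq_map_pyRange (d := ""), List.foldl_map]
    have := pv_fold_equiv lines hunk_lines (PySem.List.pyRange 0 (lines.length : Int) 1) [] none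
      (fun j hj => ((PySem.List.mem_pyRange_one).mp hj).1)
      (fun p hp => by cases hp)
      (PySem.List.pairwise_lt_pyRange_one 0 _)
    simp only [pvDecode] at this
    rw [this]
    simp [PySem.List.len_eq]
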